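-- pv_equiv track=rewrite | github.com/csebuetnlp/banglanmt | segmentation/segmenter.py | _is_open
-- ===== SOURCE A (Python) =====
-- def _is_open(span_str, brackets='()'):
--     """Check if the span ends with an unclosed `bracket`."""
--     offset = span_str.find(brackets[0])
--     nesting = 0 if offset == -1 else 1
--
--     while offset != -1:
--         opener = span_str.find(brackets[0], offset + 1)
--         closer = span_str.find(brackets[1], offset + 1)
--
--         if opener == -1:
--             if closer == -1:
--                 offset = -1
--             else:
--                 offset = closer
--                 nesting -= 1
--         elif closer == -1:
--             offset = opener
--             nesting += 1
--         elif opener < closer: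
--             offset = opener
--             nesting += 1
--         elif closer < opener:
--             offset = closer
--             nesting -= 1
--         else:
--             msg = 'at offset={}: closer={}, opener={}'
--             raise RuntimeError(msg.format(offset, closer, opener))
--
--     return nesting > 0
-- ===== SOURCE B (Python) =====
-- def _is_open(span_str, brackets='()'):
--     """Check if the span ends with an unclosed `bracket`."""
--     opener, closer = brackets[0], brackets[1]
--     nesting = 0
--     seen_open = False
--     for ch in span_str:
--         if ch == opener:
--             nesting += 1
--             seen_open = True
--         elif ch == closer and seen_open:
--             nesting -= 1
--     return nesting > 0
-- ===== Notes on version B (the rewrite author's own statement) =====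
-- stated objective: simpler
-- what changed: Replaces A's find-jumping while-loop (repeated str.find for the next opener/closer and a four-way branch) with a single flat left-to-right scan keeping a signed nesting counter and a seen_open flag.
-- outside the precondition, e.g. on _is_open('abc', 'x'): A returns False, B raises IndexError
import Mathlib
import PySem

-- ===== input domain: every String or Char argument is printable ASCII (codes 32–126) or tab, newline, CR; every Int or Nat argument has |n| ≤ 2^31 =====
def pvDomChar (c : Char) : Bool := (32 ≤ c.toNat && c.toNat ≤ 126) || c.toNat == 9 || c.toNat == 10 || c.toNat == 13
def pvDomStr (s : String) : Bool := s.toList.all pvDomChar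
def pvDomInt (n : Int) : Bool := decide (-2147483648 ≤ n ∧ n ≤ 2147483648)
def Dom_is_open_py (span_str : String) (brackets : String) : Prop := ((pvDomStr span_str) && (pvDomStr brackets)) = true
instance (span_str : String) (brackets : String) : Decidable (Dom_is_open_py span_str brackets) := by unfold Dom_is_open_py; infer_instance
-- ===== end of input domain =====

-- B replaces A's find-jumping while-loop with one flat left-to-right scan (simpler); equal return values proved on Pre_.

-- ===== PORT A =====
-- the while-loop of A: offset/nesting are the Python locals; fuel only guards termination
-- (the loop's offset strictly increases, so span.length+1 fuel is never exhausted on reachable states).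
-- The branch where opener = closer is Python's `raise RuntimeError` (excluded by Pre_): the port returns the junk value `nesting` there.
def pvALoop (s : List Char) (b0 b1 : Char) (fuel : Nat) (offset : Int) (nesting : Int) : Int :=
  match fuel with
  | 0 => nesting
  | fuel + 1 =>
    if offset = -1 then nesting
    else
      let opener := PySem.Chars.findFrom s [b0] (offset + 1) none
      let closer := PySem.Chars.findFrom s [b1] (offset + 1) none
      if opener = -1 then
        if closer = -1 then nesting   -- offset := -1; the while-test then exits and A returns nesting
        else pvALoop s b0 b1 fuel closer (nesting - 1)
      else if closer = -1 then pvALoop s b0 b1 fuel opener (nesting + 1)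
      else if opener < closer then pvALoop s b0 b1 fuel opener (nesting + 1)
      else if closer < opener then pvALoop s b0 b1 fuel closer (nesting - 1)
      else nesting

def is_open_py (span_str : String) (brackets : String) : Bool :=
  match PySem.Str.pyGet? brackets 0 with
  | none => false   -- brackets[0]: IndexError (outside Pre_)
  | some b0 =>
    let offset := PySem.Chars.find span_str.toList [b0]
    let nesting : Int := if offset = -1 then 0 else 1
    if offset = -1 then decide (nesting > 0)   -- while-loop body never runs
    else
      match PySem.Str.pyGet? brackets 1 with
      | none => false   -- brackets[1] on the first iteration: IndexError (outside Pre_)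
      | some b1 => decide (pvALoop span_str.toList b0 b1 (span_str.toList.length + 1) offset nesting > 0)

-- ===== PORT B =====
def pvBStep (opener closer : Char) (st : Int × Bool) (ch : Char) : Int × Bool :=
  if ch = opener then (st.1 + 1, true)
  else if ch = closer ∧ st.2 then (st.1 - 1, st.2)
  else st

def is_open_py_alt (span_str : String) (brackets : String) : Bool :=
  match PySem.Str.pyGet? brackets 0, PySem.Str.pyGet? brackets 1 with
  | some opener, some closer =>
    let r := span_str.toList.foldl (pvBStep opener closer) ((0 : Int), false)
    decide (r.1 > 0)
  | _, _ => false   -- `opener, closer = brackets[0], brackets[1]`: IndexError (outside Pre_)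

-- ===== PRECONDITION & SPEC =====
-- Pre_ excludes degenerate `brackets`: strings shorter than 2 characters (B's unconditional unpacking
-- raises IndexError where A may still return, and A itself raises once span contains brackets[0]), and
-- equal opener/closer once span contains two or more occurrences of it (there A raises RuntimeError).
def Pre_is_open_py (span_str : String) (brackets : String) : Prop :=
  2 ≤ brackets.toList.length ∧
    (brackets.toList.getD 0 ' ' ≠ brackets.toList.getD 1 ' ' ∨
      span_str.toList.count (brackets.toList.getD 0 ' ') ≤ 1)
instance (span_str : String) (brackets : String) : Decidable (Pre_is_open_py span_str brackets) := by
  unfold Pre_is_open_py; infer_instance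

def pvWitness_is_open_py : String × String := ("a(b(c)", "()")

def Spec_is_open_py (span_str : String) (brackets : String) (out : Bool) : Prop := out = is_open_py_alt span_str brackets
instance (span_str : String) (brackets : String) (out : Bool) : Decidable (Spec_is_open_py span_str brackets out) := by unfold Spec_is_open_py; infer_instance

-- ===== CLAIM (what is proved, stated in full; the proofs are below) =====
def Claim_equal_is_open_py : Prop := ∀ (span_str : String) (brackets : String), Dom_is_open_py span_str brackets → Pre_is_open_py span_str brackets → Spec_is_open_py span_str brackets (is_open_py span_str brackets)

-- ===== LEMMAS AND PROOFS =====

-- signed bracket weight of a character / of a string suffix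
def pvDelta (b0 b1 : Char) (c : Char) : Int := if c = b0 then 1 else if c = b1 then -1 else 0
def pvSig (b0 b1 : Char) (l : List Char) : Int := (l.map (pvDelta b0 b1)).sum

theorem pvSig_cons (b0 b1 c : Char) (l : List Char) :
    pvSig b0 b1 (c :: l) = pvDelta b0 b1 c + pvSig b0 b1 l := by
  simp [pvSig]

theorem pvSig_append (b0 b1 : Char) (u v : List Char) :
    pvSig b0 b1 (u ++ v) = pvSig b0 b1 u + pvSig b0 b1 v := by
  simp [pvSig]

theorem pvSig_zero_of_no_brackets (b0 b1 : Char) (l : List Char)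
    (h : ∀ c ∈ l, c ≠ b0 ∧ c ≠ b1) : pvSig b0 b1 l = 0 := by
  induction l with
  | nil => rfl
  | cons c t ih =>
    have hc := h c (by simp)
    rw [pvSig_cons, ih (fun x hx => h x (by simp [hx]))]
    simp [pvDelta, hc.1, hc.2]

-- split of the signed sum at the first index k carrying a bracket
theorem pvSig_split (b0 b1 : Char) (t : List Char) (k : Nat) (hk : k < t.length)
    (hpre : ∀ j, (hj : j < k) → t[j]'(by omega) ≠ b0 ∧ t[j]'(by omega) ≠ b1) :
    pvSig b0 b1 t = pvDelta b0 b1 (t[k]'hk) + pvSig b0 b1 (t.drop (k + 1)) := by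
  conv_lhs => rw [← List.take_append_drop k t]
  rw [pvSig_append, List.drop_eq_getElem_cons hk, pvSig_cons]
  have hz : pvSig b0 b1 (t.take k) = 0 := by
    apply pvSig_zero_of_no_brackets
    intro c hc
    obtain ⟨j, hj, rfl⟩ := List.getElem_of_mem hc
    have hjk : j < k := lt_of_lt_of_le hj (List.length_take_le k t)
    simpa [List.getElem_take] using hpre j hjk
  omega

-- single-character substring search: membership / exact characterisation
theorem pvSingleton_infix_iff (c : Char) (l : List Char) : [c] <:+: l ↔ c ∈ l := by
  constructor
  · intro h; exact h.mem (by simp)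
  · intro h
    obtain ⟨u, v, rfl⟩ := List.mem_iff_append.mp h
    exact ⟨u, v, by simp⟩

theorem pvSingleton_prefix_drop_iff (c : Char) (l : List Char) (j : Nat) (hj : j < l.length) :
    [c] <+: l.drop j ↔ l[j] = c := by
  rw [List.drop_eq_getElem_cons hj]
  constructor
  · rintro ⟨v, hv⟩
    exact (List.cons_eq_cons.mp hv).1.symm
  · rintro rfl
    exact ⟨_, rfl⟩

theorem pvFind_eq_neg_one_iff (c : Char) (l : List Char) :
    PySem.Chars.find l [c] = -1 ↔ c ∉ l := by
  rw [PySem.Chars.find_eq_neg_one_iff, pvSingleton_infix_iff]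

-- first-occurrence facts for a single-character find that is not -1
theorem pvFind_pos_spec (c : Char) (l : List Char) (h : PySem.Chars.find l [c] ≠ -1) :
    ∃ k : Nat, PySem.Chars.find l [c] = (k : Int) ∧
      ∃ (hk : k < l.length), l[k]'hk = c ∧ ∀ j, (hj : j < k) → l[j]'(by omega) ≠ c := by
  have hnn : 0 ≤ PySem.Chars.find l [c] := by
    rw [PySem.Chars.find_nonneg_iff, pvSingleton_infix_iff]
    by_contra hmem
    exact h ((pvFind_eq_neg_one_iff c l).mpr hmem)
  obtain ⟨hpre, hmin⟩ := PySem.Chars.find_spec (s := l) (sub := [c]) hnn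
  have hlt : (PySem.Chars.find l [c]).toNat < l.length := by
    by_contra hlen
    push Not at hlen
    have : l.drop (PySem.Chars.find l [c]).toNat = [] := List.drop_eq_nil_of_le hlen
    rw [this] at hpre
    exact absurd (List.prefix_nil.mp hpre) (by simp)
  refine ⟨(PySem.Chars.find l [c]).toNat, by omega, hlt,
    (pvSingleton_prefix_drop_iff c l _ hlt).mp hpre, ?_⟩
  intro j hj hc
  have hjl : j < l.length := by omega
  exact hmin j hj ((pvSingleton_prefix_drop_iff c l j hjl).mpr hc)

-- ===== the A-side loop invariant =====
theorem pvALoop_eq_sig (s : List Char) (b0 b1 : Char) (hne : b0 ≠ b1) :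
    ∀ (fuel o : Nat) (n : Int), o < s.length → s.length - o ≤ fuel →
      pvALoop s b0 b1 fuel (o : Int) n = n + pvSig b0 b1 (s.drop (o + 1)) := by
  intro fuel
  induction fuel with
  | zero => intro o n ho hf; omega
  | succ fuel ih =>
    intro o n ho hf
    have hocast : ((o : Int) ≠ -1) := by omega
    have hk1 : o + 1 ≤ s.length := by omega
    rw [pvALoop]
    simp only [hocast, if_false]
    have hcast : (o : Int) + 1 = ((o + 1 : Nat) : Int) := by push_cast; ring
    rw [hcast]
    rw [PySem.Chars.findFrom_natCast s [b0] (o + 1) hk1,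
        PySem.Chars.findFrom_natCast s [b1] (o + 1) hk1]
    set t := s.drop (o + 1) with ht
    have htlen : t.length = s.length - (o + 1) := by simp [ht]
    by_cases hp : PySem.Chars.find t [b0] = -1
    · by_cases hq : PySem.Chars.find t [b1] = -1
      · -- neither bracket occurs after o: loop exits with nesting n
        simp only [hp, hq]
        rw [pvSig_zero_of_no_brackets b0 b1 t
          (fun c hc => ⟨fun h => (pvFind_eq_neg_one_iff b0 t).mp hp (h ▸ hc),
                        fun h => (pvFind_eq_neg_one_iff b1 t).mp hq (h ▸ hc)⟩)]
        omega
      · -- only a closer occurs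
        obtain ⟨k, hkeq, hklt, hkc, hkmin⟩ := pvFind_pos_spec b1 t hq
        have hb0nin : b0 ∉ t := (pvFind_eq_neg_one_iff b0 t).mp hp
        simp only [hp, hq, if_true, if_false]
        have hoff : (↑(o + 1) : Int) + PySem.Chars.find t [b1] = ((o + 1 + k : Nat) : Int) := by
          rw [hkeq]; push_cast; ring
        rw [hoff]
        have hlt : o + 1 + k < s.length := by omega
        rw [ih (o + 1 + k) (n - 1) hlt (by omega)]
        have hdrop : s.drop (o + 1 + k + 1) = t.drop (k + 1) := by
          rw [ht, List.drop_drop]; ring_nf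
        rw [hdrop, pvSig_split b0 b1 t k hklt
          (fun j hj => ⟨fun h => hb0nin (h ▸ List.getElem_mem _), hkmin j hj⟩)]
        have : pvDelta b0 b1 (t[k]'hklt) = -1 := by
          simp [pvDelta, hkc, Ne.symm hne]
        omega
    · by_cases hq : PySem.Chars.find t [b1] = -1
      · -- only an opener occurs
        obtain ⟨k, hkeq, hklt, hkc, hkmin⟩ := pvFind_pos_spec b0 t hp
        have hb1nin : b1 ∉ t := (pvFind_eq_neg_one_iff b1 t).mp hq
        simp only [hp, hq, if_true, if_false]
        have hoff : (↑(o + 1) : Int) + PySem.Chars.find t [b0] = ((o + 1 + k : Nat) : Int) := by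
          rw [hkeq]; push_cast; ring
        rw [hoff]
        have hlt : o + 1 + k < s.length := by omega
        rw [ih (o + 1 + k) (n + 1) hlt (by omega)]
        have hdrop : s.drop (o + 1 + k + 1) = t.drop (k + 1) := by
          rw [ht, List.drop_drop]; ring_nf
        rw [hdrop, pvSig_split b0 b1 t k hklt
          (fun j hj => ⟨hkmin j hj, fun h => hb1nin (h ▸ List.getElem_mem _)⟩)]
        have : pvDelta b0 b1 (t[k]'hklt) = 1 := by simp [pvDelta, hkc]
        omega
      · -- both occur: the nearer one wins; they cannot coincide since b0 ≠ b1
        obtain ⟨k, hkeq, hklt, hkc, hkmin⟩ := pvFind_pos_spec b0 t hp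
        obtain ⟨m, hmeq, hmlt, hmc, hmmin⟩ := pvFind_pos_spec b1 t hq
        have hkm : k ≠ m := by
          intro h; subst h; exact hne (hkc ▸ hmc ▸ rfl)
        simp only [hp, hq, if_false]
        rcases Nat.lt_or_ge k m with hlt' | hge
        · have hcond : (↑(o + 1) : Int) + PySem.Chars.find t [b0] <
              (↑(o + 1) : Int) + PySem.Chars.find t [b1] := by
            rw [hkeq, hmeq]; push_cast; omega
          rw [if_pos hcond]
          have hoff : (↑(o + 1) : Int) + PySem.Chars.find t [b0] = ((o + 1 + k : Nat) : Int) := by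
            rw [hkeq]; push_cast; ring
          rw [hoff]
          have hltl : o + 1 + k < s.length := by omega
          rw [ih (o + 1 + k) (n + 1) hltl (by omega)]
          have hdrop : s.drop (o + 1 + k + 1) = t.drop (k + 1) := by
            rw [ht, List.drop_drop]; ring_nf
          rw [hdrop, pvSig_split b0 b1 t k hklt
            (fun j hj => ⟨hkmin j hj, hmmin j (by omega)⟩)]
          have : pvDelta b0 b1 (t[k]'hklt) = 1 := by simp [pvDelta, hkc]
          omega
        · have hml : m < k := by omega
          have hcond : ¬ ((↑(o + 1) : Int) + PySem.Chars.find t [b0] <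
              (↑(o + 1) : Int) + PySem.Chars.find t [b1]) := by
            rw [hkeq, hmeq]; push_cast; omega
          have hcond2 : (↑(o + 1) : Int) + PySem.Chars.find t [b1] <
              (↑(o + 1) : Int) + PySem.Chars.find t [b0] := by
            rw [hkeq, hmeq]; push_cast; omega
          rw [if_neg hcond, if_pos hcond2]
          have hoff : (↑(o + 1) : Int) + PySem.Chars.find t [b1] = ((o + 1 + m : Nat) : Int) := by
            rw [hmeq]; push_cast; ring
          rw [hoff]
          have hltl : o + 1 + m < s.length := by omega
          rw [ih (o + 1 + m) (n - 1) hltl (by omega)]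
          have hdrop : s.drop (o + 1 + m + 1) = t.drop (m + 1) := by
            rw [ht, List.drop_drop]; ring_nf
          rw [hdrop, pvSig_split b0 b1 t m hmlt
            (fun j hj => ⟨hkmin j (by omega), hmmin j hj⟩)]
          have : pvDelta b0 b1 (t[m]'hmlt) = -1 := by
            simp [pvDelta, hmc, Ne.symm hne]
          omega

-- ===== the B-side fold characterisation =====
theorem pvB_fold_true (b0 b1 : Char) (hne : b0 ≠ b1) (l : List Char) :
    ∀ n : Int, l.foldl (pvBStep b0 b1) (n, true) = (n + pvSig b0 b1 l, true) := by
  induction l with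
  | nil => intro n; simp [pvSig]
  | cons c t ih =>
    intro n
    rw [List.foldl_cons]
    by_cases h0 : c = b0
    · rw [show pvBStep b0 b1 (n, true) c = (n + 1, true) from by simp [pvBStep, h0],
          ih, pvSig_cons, show pvDelta b0 b1 c = 1 from by simp [pvDelta, h0]]
      exact congrArg (fun x => (x, true)) (by ring)
    · by_cases h1 : c = b1
      · rw [show pvBStep b0 b1 (n, true) c = (n - 1, true) from by simp [pvBStep, h1, Ne.symm hne],
            ih, pvSig_cons, show pvDelta b0 b1 c = -1 from by simp [pvDelta, h1, Ne.symm hne]]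
        exact congrArg (fun x => (x, true)) (by ring)
      · rw [show pvBStep b0 b1 (n, true) c = (n, true) from by simp [pvBStep, h0, h1],
            ih, pvSig_cons, show pvDelta b0 b1 c = 0 from by simp [pvDelta, h0, h1]]
        exact congrArg (fun x => (x, true)) (by ring)

theorem pvB_fold_false (b0 b1 : Char) (l : List Char) (h : b0 ∉ l) :
    ∀ n : Int, l.foldl (pvBStep b0 b1) (n, false) = (n, false) := by
  induction l with
  | nil => intro n; rfl
  | cons c t ih =>
    intro n
    have hc : c ≠ b0 := fun hh => h (hh ▸ List.mem_cons_self ..)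
    have hstep : pvBStep b0 b1 (n, false) c = (n, false) := by simp [pvBStep, hc]
    rw [List.foldl_cons, hstep]
    exact ih (fun hm => h (List.mem_cons_of_mem _ hm)) n

-- B's scan is inert on a suffix free of both brackets
theorem pvB_fold_true_nomem (b0 b1 : Char) (l : List Char) (h0 : b0 ∉ l) (h1 : b1 ∉ l) :
    ∀ n : Int, l.foldl (pvBStep b0 b1) (n, true) = (n, true) := by
  induction l with
  | nil => intro n; rfl
  | cons c t ih =>
    intro n
    have hc0 : c ≠ b0 := fun hh => h0 (hh ▸ List.mem_cons_self ..)
    have hc1 : c ≠ b1 := fun hh => h1 (hh ▸ List.mem_cons_self ..)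
    rw [List.foldl_cons, show pvBStep b0 b1 (n, true) c = (n, true) from by simp [pvBStep, hc0, hc1]]
    exact ih (fun hm => h0 (List.mem_cons_of_mem _ hm)) (fun hm => h1 (List.mem_cons_of_mem _ hm)) n

-- the two ports agree at the list level (stated in the exact shape of is_open_py's body)
theorem pv_main (s : List Char) (b0 b1 : Char) (hne : b0 ≠ b1) :
    (let offset := PySem.Chars.find s [b0]
     let nesting : Int := if offset = -1 then 0 else 1
     if offset = -1 then decide (nesting > 0)
     else decide (pvALoop s b0 b1 (s.length + 1) offset nesting > 0))
    = decide ((s.foldl (pvBStep b0 b1) ((0:Int), false)).1 > 0) := by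
  simp only
  by_cases hfnd : PySem.Chars.find s [b0] = -1
  · have hnin : b0 ∉ s := (pvFind_eq_neg_one_iff b0 s).mp hfnd
    rw [pvB_fold_false b0 b1 s hnin 0]
    simp [hfnd]
  · obtain ⟨k, hkeq, hklt, hkc, hkmin⟩ := pvFind_pos_spec b0 s hfnd
    simp only [hfnd, if_false]
    rw [hkeq, pvALoop_eq_sig s b0 b1 hne (s.length + 1) k 1 hklt (by omega)]
    -- B side: split the scan at the first opener
    conv_rhs => rw [← List.take_append_drop k s, List.foldl_append]
    rw [pvB_fold_false b0 b1 (s.take k)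
      (by
        intro hm
        obtain ⟨j, hj, hjc⟩ := List.getElem_of_mem hm
        have hjk : j < k := lt_of_lt_of_le hj (List.length_take_le k s)
        exact hkmin j hjk (by simpa [List.getElem_take] using hjc)) 0]
    rw [List.drop_eq_getElem_cons hklt]
    simp only [List.foldl_cons, pvBStep, if_pos hkc]
    rw [pvB_fold_true b0 b1 hne]
    norm_num

-- the degenerate case brackets[0] = brackets[1] with at most one occurrence in span:
-- A's loop exits after the first occurrence (no later occurrence of either bracket)
theorem pv_main_eq (s : List Char) (b0 : Char) (hcnt : s.count b0 ≤ 1) :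
    (let offset := PySem.Chars.find s [b0]
     let nesting : Int := if offset = -1 then 0 else 1
     if offset = -1 then decide (nesting > 0)
     else decide (pvALoop s b0 b0 (s.length + 1) offset nesting > 0))
    = decide ((s.foldl (pvBStep b0 b0) ((0:Int), false)).1 > 0) := by
  simp only
  by_cases hfnd : PySem.Chars.find s [b0] = -1
  · have hnin : b0 ∉ s := (pvFind_eq_neg_one_iff b0 s).mp hfnd
    rw [pvB_fold_false b0 b0 s hnin 0]
    simp [hfnd]
  · obtain ⟨k, hkeq, hklt, hkc, hkmin⟩ := pvFind_pos_spec b0 s hfnd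
    have hnin : b0 ∉ s.drop (k + 1) := by
      intro hm
      have hpos : 0 < (s.drop (k + 1)).count b0 := List.count_pos_iff.mpr hm
      have hsplit : s.count b0 = (s.take k).count b0 + ((s[k]'hklt :: s.drop (k + 1)).count b0) := by
        conv_lhs => rw [← List.take_append_drop k s, List.drop_eq_getElem_cons hklt]
        rw [List.count_append]
      rw [List.count_cons] at hsplit
      simp [hkc] at hsplit
      omega
    have hfnd' : PySem.Chars.find (s.drop (k + 1)) [b0] = -1 := (pvFind_eq_neg_one_iff b0 _).mpr hnin
    simp only [hfnd, if_false]
    rw [hkeq, pvALoop]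
    have hocast : ((k : Int) ≠ -1) := by omega
    simp only [hocast, if_false]
    have hcast : (k : Int) + 1 = ((k + 1 : Nat) : Int) := by push_cast; ring
    rw [hcast, PySem.Chars.findFrom_natCast s [b0] (k + 1) (by omega)]
    rw [hfnd']
    simp only [reduceIte]
    -- B side: split the scan at the single occurrence
    conv_rhs => rw [← List.take_append_drop k s, List.foldl_append]
    rw [pvB_fold_false b0 b0 (s.take k)
      (by
        intro hm
        obtain ⟨j, hj, hjc⟩ := List.getElem_of_mem hm
        have hjk : j < k := lt_of_lt_of_le hj (List.length_take_le k s)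
        exact hkmin j hjk (by simpa [List.getElem_take] using hjc)) 0]
    rw [List.drop_eq_getElem_cons hklt]
    simp only [List.foldl_cons, pvBStep, if_pos hkc]
    rw [pvB_fold_true_nomem b0 b0 (s.drop (k + 1)) hnin hnin]
    norm_num

-- ===== VERDICT (by name: the statement is the Claim_ definition above) =====
theorem is_open_py_spec : Claim_equal_is_open_py := by
  intro span_str brackets _hdom hpre
  obtain ⟨hlen, hdisj⟩ := hpre
  unfold Spec_is_open_py is_open_py is_open_py_alt
  have h0 : PySem.Str.pyGet? brackets 0 = some (brackets.toList.getD 0 ' ') := by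
    have : PySem.Str.pyGet? brackets (0 : Int) = brackets.toList[(0:Nat)]? := by
      exact_mod_cast PySem.Str.pyGet?_natCast brackets 0
    rw [this, List.getElem?_eq_getElem (by omega), List.getD_eq_getElem _ _ (by omega)]
  have h1 : PySem.Str.pyGet? brackets 1 = some (brackets.toList.getD 1 ' ') := by
    have : PySem.Str.pyGet? brackets (1 : Int) = brackets.toList[(1:Nat)]? := by
      exact_mod_cast PySem.Str.pyGet?_natCast brackets 1
    rw [this, List.getElem?_eq_getElem (by omega), List.getD_eq_getElem _ _ (by omega)]
  rw [h0, h1]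
  by_cases hne : brackets.toList.getD 0 ' ' = brackets.toList.getD 1 ' '
  · have hcnt : span_str.toList.count (brackets.toList.getD 0 ' ') ≤ 1 :=
      hdisj.resolve_left (by simpa using hne)
    rw [← hne]
    exact pv_main_eq span_str.toList (brackets.toList.getD 0 ' ') hcnt
  · exact pv_main span_str.toList (brackets.toList.getD 0 ' ') (brackets.toList.getD 1 ' ') hne
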